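-- pv_equiv track=rewrite | github.com/advviniciusgyn/classificadespesas | src/categorizers/ai_categorizer.py | _extract_category_from_response
-- ===== SOURCE A (Python) =====
-- from typing import Dict, List, Optional, Any, Tuple
--
-- def _extract_category_from_response(response_text: str, available_categories: List[str]) -> Optional[str]:
--     """
--     Extrai a categoria da resposta da API.
--
--     Args:
--         response_text: Texto da resposta da API
--         available_categories: Lista de categorias disponíveis
--
--     Returns:
--         Categoria extraída ou None se não for possível extrair
--     """
--     # Limpa a resposta
--     clean_response = response_text.strip().lower()
--
--     # Verifica se a resposta é exatamente uma das categorias disponíveis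
--     for category in available_categories:
--         if clean_response == category.lower():
--             return category
--
--     # Se não for exata, procura a categoria na resposta
--     for category in available_categories:
--         if category.lower() in clean_response:
--             return category
--
--     return None
-- ===== SOURCE B (Python) =====
-- def _extract_category_from_response(response_text, available_categories):
--     clean_response = response_text.strip().lower()
--     candidate = None
--     for category in available_categories:
--         cat_lower = category.lower()
--         if clean_response == cat_lower:
--             return category
--         if candidate is None and cat_lower in clean_response:
--             candidate = category
--     return candidate
-- ===== Notes on version B (the rewrite author's own statement) =====
-- stated objective: alternative
-- what changed: Replaces A's two separate passes over available_categories with a single pass that returns immediately on an exact match and defers the first substring match in an accumulator returned at the end.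
import Mathlib
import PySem

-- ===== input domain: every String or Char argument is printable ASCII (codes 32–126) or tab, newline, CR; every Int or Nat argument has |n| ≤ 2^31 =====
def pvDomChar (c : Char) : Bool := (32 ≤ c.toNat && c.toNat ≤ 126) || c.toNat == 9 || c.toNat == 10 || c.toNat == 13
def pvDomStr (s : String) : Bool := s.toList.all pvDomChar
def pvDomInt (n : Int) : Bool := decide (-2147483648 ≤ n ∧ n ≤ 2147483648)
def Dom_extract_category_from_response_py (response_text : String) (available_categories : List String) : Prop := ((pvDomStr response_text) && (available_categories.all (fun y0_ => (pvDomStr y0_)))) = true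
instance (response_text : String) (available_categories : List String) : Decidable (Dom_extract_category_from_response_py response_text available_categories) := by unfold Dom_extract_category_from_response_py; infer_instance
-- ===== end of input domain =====

-- B merges A's two passes into one pass that lowercases each category once and
-- defers the first substring match in an accumulator (single-pass alternative, same results).

-- ===== PORT A =====
-- first loop of A: exact match
def pvAExact (clean : String) : List String → Option String
  | [] => none
  | c :: rest => if clean == PySem.Str.lower c then some c else pvAExact clean rest

-- second loop of A: substring match
def pvASub (clean : String) : List String → Option String
  | [] => none
  | c :: rest => if PySem.Str.isIn (PySem.Str.lower c) clean then some c else pvASub clean rest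

def extract_category_from_response_py (response_text : String) (available_categories : List String) : Option String :=
  let clean_response := PySem.Str.lower (PySem.Str.strip response_text)
  match pvAExact clean_response available_categories with
  | some c => some c
  | none => pvASub clean_response available_categories

-- ===== PORT B =====
-- B's single loop with a deferred substring-candidate accumulator
def pvBLoop (clean : String) : List String → Option String → Option String
  | [], candidate => candidate
  | category :: rest, candidate =>
      let cat_lower := PySem.Str.lower category
      if clean == cat_lower then some category
      else pvBLoop clean rest
        (if candidate.isNone && PySem.Str.isIn cat_lower clean then some category else candidate)

def extract_category_from_response_py_alt (response_text : String) (available_categories : List String) : Option String :=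
  let clean_response := PySem.Str.lower (PySem.Str.strip response_text)
  pvBLoop clean_response available_categories none

-- ===== PRECONDITION & SPEC =====
def Spec_extract_category_from_response_py (response_text : String) (available_categories : List String) (out : Option String) : Prop := out = extract_category_from_response_py_alt response_text available_categories
instance (response_text : String) (available_categories : List String) (out : Option String) : Decidable (Spec_extract_category_from_response_py response_text available_categories out) := by unfold Spec_extract_category_from_response_py; infer_instance

-- ===== CLAIM (what is proved, stated in full; the proofs are below) =====
def Claim_equal_extract_category_from_response_py : Prop := ∀ (response_text : String) (available_categories : List String), Dom_extract_category_from_response_py response_text available_categories → Spec_extract_category_from_response_py response_text available_categories (extract_category_from_response_py response_text available_categories)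

-- ===== LEMMAS AND PROOFS =====
theorem pvBLoop_eq (clean : String) (cats : List String) (acc : Option String) :
    pvBLoop clean cats acc =
      match pvAExact clean cats with
      | some c => some c
      | none => match acc with
        | some a => some a
        | none => pvASub clean cats := by
  induction cats generalizing acc with
  | nil => cases acc <;> simp [pvBLoop, pvAExact, pvASub]
  | cons c rest ih =>
    simp only [pvBLoop, pvAExact, pvASub]
    by_cases h : (clean == PySem.Str.lower c) = true
    · simp [h]
    · simp only [h, if_false, Bool.false_eq_true]
      rw [ih]
      cases acc with
      | some a => simp
      | none =>
        cases pvAExact clean rest <;>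
          by_cases hs : PySem.Str.isIn (PySem.Str.lower c) clean = true <;>
          simp_all [PySem.Str.isIn]

-- ===== VERDICT (by name: the statement is the Claim_ definition above) =====
theorem extract_category_from_response_py_spec : Claim_equal_extract_category_from_response_py := by
  intro rt cats _
  unfold Spec_extract_category_from_response_py extract_category_from_response_py extract_category_from_response_py_alt
  rw [pvBLoop_eq]
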